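-- pv_equiv track=rewrite | github.com/MasterZeeno/SSR | test/test3.py | sort_after_key
-- ===== SOURCE A (Python) =====
-- def sort_after_key(d, pivot_key, priority_key="EMD"):
--     found = False
--     before = {}
--     after = {}
--
--     for k, v in d.items():
--         if found:
--             after[k] = v
--         else:
--             before[k] = v
--             if k == pivot_key:
--                 found = True
--
--     # Extract the priority key if it exists in the "after" dict
--     priority_item = {priority_key: after.pop(priority_key)} if priority_key in after else {}
--
--     # Sort the rest
--     after_sorted = dict(sorted(after.items()))
--
--     # Merge the parts: before, priority_key (if present), and sorted rest
--     return {**before, **priority_item, **after_sorted}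
-- ===== SOURCE B (Python) =====
-- def sort_after_key(d, pivot_key, priority_key="EMD"):
--     items = iter(d.items())
--     out = {}
--     for k, v in items:
--         out[k] = v
--         if k == pivot_key:
--             break
--     rest = list(items)
--     while rest:
--         keys = [k for k, _ in rest]
--         k = priority_key if priority_key in keys else min(keys)
--         out[k] = rest.pop(keys.index(k))[1]
--     return out
-- ===== Notes on version B (the rewrite author's own statement) =====
-- stated objective: alternative
-- what changed: B replaces A's found-flag partition loop, dict.pop and the sorted() call by an iterator loop that stops at the pivot plus a selection loop that repeatedly extracts the priority key (if still present) or the minimum remaining key from the tail and appends it to the output - no sort call at all.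
import Mathlib
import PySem

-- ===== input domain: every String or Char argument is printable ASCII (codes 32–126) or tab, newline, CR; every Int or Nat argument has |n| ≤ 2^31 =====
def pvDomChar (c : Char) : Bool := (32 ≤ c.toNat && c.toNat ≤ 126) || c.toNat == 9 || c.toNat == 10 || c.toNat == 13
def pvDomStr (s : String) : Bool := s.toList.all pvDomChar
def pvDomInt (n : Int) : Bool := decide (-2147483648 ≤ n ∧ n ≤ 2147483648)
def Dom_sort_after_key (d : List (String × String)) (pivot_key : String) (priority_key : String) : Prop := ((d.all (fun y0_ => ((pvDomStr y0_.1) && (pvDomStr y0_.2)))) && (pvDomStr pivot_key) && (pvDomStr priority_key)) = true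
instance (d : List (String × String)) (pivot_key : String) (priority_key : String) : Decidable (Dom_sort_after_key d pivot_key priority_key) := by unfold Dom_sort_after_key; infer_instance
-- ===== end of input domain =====

-- B replaces A's found-flag loop, dict.pop and sorted() by an iterator loop that breaks at the
-- pivot plus a selection loop that repeatedly extracts the priority key or the minimum remaining
-- key from the tail — no sort call at all (objective: alternative; O(n^2) instead of O(n log n)).

-- ===== PORT A =====
def sort_after_key (d : List (String × String)) (pivot_key : String) (priority_key : String) : List (String × String) :=
  -- for k, v in d.items(): … (state: found, before, after)
  let st := d.foldl
    (fun (st : Bool × PySem.Dict String String × PySem.Dict String String) kv =>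
      if st.1 then (st.1, st.2.1, st.2.2.insert kv.1 kv.2)
      else
        let before := st.2.1.insert kv.1 kv.2
        if kv.1 == pivot_key then (true, before, st.2.2) else (st.1, before, st.2.2))
    (false, PySem.Dict.empty, PySem.Dict.empty)
  let before := st.2.1
  -- priority_item = {priority_key: after.pop(priority_key)} if priority_key in after else {}
  let pa : PySem.Dict String String × PySem.Dict String String :=
    if st.2.2.contains priority_key then
      match st.2.2.pop? priority_key with
      | some (v, rest) => (PySem.Dict.empty.insert priority_key v, rest)
      | none => (PySem.Dict.empty, st.2.2)  -- unreachable: contains priority_key holds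
    else (PySem.Dict.empty, st.2.2)
  -- after_sorted = dict(sorted(after.items()))  (Python sorts the (k, v) pairs lexicographically)
  let after_sorted := PySem.Dict.ofList (PySem.List.sorted2 pa.2.items Prod.fst Prod.snd)
  -- {**before, **priority_item, **after_sorted}
  (((PySem.Dict.empty.update before.items).update pa.1.items).update after_sorted.items).items

-- ===== PORT B =====
-- termination fact for selLoop, cited by name in decreasing_by (must precede the definition)
-- (it is PySem.List.length_of_pop?_eq_some, used directly below)

-- 'for k, v in items: out[k] = v; if k == pivot_key: break' over the iterator; returns (out, rest of the iterator)
def beforeLoop (pivot_key : String) : PySem.Dict String String → List (String × String) → PySem.Dict String String × List (String × String)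
  | out, [] => (out, [])
  | out, p :: l =>
    let out' := out.insert p.1 p.2
    if p.1 == pivot_key then (out', l) else beforeLoop pivot_key out' l

-- 'while rest: keys = [k for k,_ in rest]; k = priority if in keys else min(keys); out[k] = rest.pop(keys.index(k))[1]'
def selLoop (priority_key : String) (out : PySem.Dict String String) (rest : List (String × String)) : PySem.Dict String String :=
  if hne : rest = [] then out
  else
    let keys := rest.map Prod.fst
    let k := if keys.contains priority_key then priority_key else ((PySem.List.min? keys (fun x => x)).getD "")
    match h2 : PySem.List.pop? rest (((PySem.List.index? keys k).getD 0 : Nat) : Int) with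
    | none => out  -- unreachable: k ∈ keys, so keys.index(k) is a valid index
    | some pr => selLoop priority_key (out.insert k pr.1.2) pr.2
termination_by rest.length
decreasing_by have := PySem.List.length_of_pop?_eq_some _ h2; omega

def sort_after_key_alt (d : List (String × String)) (pivot_key : String) (priority_key : String) : List (String × String) :=
  let s := beforeLoop pivot_key PySem.Dict.empty d
  (selLoop priority_key s.1 s.2).items

-- ===== PRECONDITION & SPEC =====
-- Pre_ excludes association lists with duplicate keys: they do not represent a Python dict
-- (Python collapses them before sort_after_key ever runs), so A's list-level behaviour there
-- is not defined by the source.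
def Pre_sort_after_key (d : List (String × String)) (pivot_key : String) (priority_key : String) : Prop :=
  (d.map Prod.fst).Nodup
instance (d : List (String × String)) (pivot_key : String) (priority_key : String) : Decidable (Pre_sort_after_key d pivot_key priority_key) := by unfold Pre_sort_after_key; infer_instance

def pvWitness_sort_after_key : (List (String × String)) × String × String :=
  ([("a", "1"), ("EMD", "9"), ("b", "2"), ("c", "3")], "a", "EMD")

def Spec_sort_after_key (d : List (String × String)) (pivot_key : String) (priority_key : String) (out : List (String × String)) : Prop := out = sort_after_key_alt d pivot_key priority_key
instance (d : List (String × String)) (pivot_key : String) (priority_key : String) (out : List (String × String)) : Decidable (Spec_sort_after_key d pivot_key priority_key out) := by unfold Spec_sort_after_key; infer_instance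

-- ===== CLAIM (what is proved, stated in full; the proofs are below) =====
def Claim_equal_sort_after_key : Prop := ∀ (d : List (String × String)) (pivot_key : String) (priority_key : String), Dom_sort_after_key d pivot_key priority_key → Pre_sort_after_key d pivot_key priority_key → Spec_sort_after_key d pivot_key priority_key (sort_after_key d pivot_key priority_key)

-- ===== LEMMAS AND PROOFS =====

-- Strict "tuple key" order used by Python's sorted with key a ↦ (k1 a, k2 a).
def lt2 {α κ₁ κ₂ : Type} [LinearOrder κ₁] [LinearOrder κ₂] (k1 : α → κ₁) (k2 : α → κ₂) (a b : α) : Prop :=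
  k1 a < k1 b ∨ (k1 a = k1 b ∧ k2 a < k2 b)

theorem lt2_blt_iff {α κ₁ κ₂ : Type} [LinearOrder κ₁] [LinearOrder κ₂] (k1 : α → κ₁) (k2 : α → κ₂) (a b : α) :
    (decide (k1 a < k1 b) || (!decide (k1 b < k1 a) && decide (k2 a < k2 b))) = true ↔ lt2 k1 k2 a b := by
  simp only [Bool.or_eq_true, Bool.and_eq_true, Bool.not_eq_true', decide_eq_true_eq,
    decide_eq_false_iff_not, lt2]
  constructor
  · rintro (h | ⟨h1, h2⟩)
    · exact Or.inl h
    · rcases lt_trichotomy (k1 a) (k1 b) with h' | h' | h'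
      · exact Or.inl h'
      · exact Or.inr ⟨h', h2⟩
      · exact absurd h' h1
  · rintro (h | ⟨h1, h2⟩)
    · exact Or.inl h
    · exact Or.inr ⟨by rw [h1]; exact lt_irrefl _, h2⟩

theorem lt2_asymm {α κ₁ κ₂ : Type} [LinearOrder κ₁] [LinearOrder κ₂] {k1 : α → κ₁} {k2 : α → κ₂} {a b : α}
    (h : lt2 k1 k2 a b) (h' : lt2 k1 k2 b a) : False := by
  rcases h with h | ⟨h1, h2⟩ <;> rcases h' with h' | ⟨h1', h2'⟩
  · exact absurd h' (lt_asymm h)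
  · exact absurd h1' (ne_of_gt h)
  · exact absurd h1 (ne_of_gt h')
  · exact absurd h2' (lt_asymm h2)

theorem lt2_trans {α κ₁ κ₂ : Type} [LinearOrder κ₁] [LinearOrder κ₂] {k1 : α → κ₁} {k2 : α → κ₂} {a b c : α}
    (h : lt2 k1 k2 a b) (h' : lt2 k1 k2 b c) : lt2 k1 k2 a c := by
  rcases h with h | ⟨h1, h2⟩ <;> rcases h' with h' | ⟨h1', h2'⟩
  · exact Or.inl (lt_trans h h')
  · exact Or.inl (h1' ▸ h)
  · exact Or.inl (h1 ▸ h')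
  · exact Or.inr ⟨h1.trans h1', lt_trans h2 h2'⟩

theorem lt2_of_not_of_ne {α κ₁ κ₂ : Type} [LinearOrder κ₁] [LinearOrder κ₂] {k1 : α → κ₁} {k2 : α → κ₂} {a b : α}
    (h : ¬ lt2 k1 k2 b a) (hne : (k1 a, k2 a) ≠ (k1 b, k2 b)) : lt2 k1 k2 a b := by
  rcases lt_trichotomy (k1 a) (k1 b) with h1 | h1 | h1
  · exact Or.inl h1
  · rcases lt_trichotomy (k2 a) (k2 b) with h2 | h2 | h2
    · exact Or.inr ⟨h1, h2⟩
    · exact absurd (Prod.ext h1 h2) hne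
    · exact absurd (Or.inr ⟨h1.symm, h2⟩) h
  · exact absurd (Or.inl h1) h

-- insertion preserves "no later element is lt2-smaller"
theorem insertBy_pairwise_lt2 {α κ₁ κ₂ : Type} [LinearOrder κ₁] [LinearOrder κ₂] (k1 : α → κ₁) (k2 : α → κ₂)
    (x : α) (ys : List α)
    (h : ys.Pairwise (fun a b => ¬ lt2 k1 k2 b a)) :
    (PySem.List.insertBy (fun a b => decide (k1 a < k1 b) || (!decide (k1 b < k1 a) && decide (k2 a < k2 b))) x ys).Pairwise
      (fun a b => ¬ lt2 k1 k2 b a) := by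
  induction ys with
  | nil => simp [PySem.List.insertBy]
  | cons y ys ih =>
    rw [List.pairwise_cons] at h
    obtain ⟨h1, h2⟩ := h
    rw [PySem.List.insertBy]
    by_cases hb : (decide (k1 x < k1 y) || (!decide (k1 y < k1 x) && decide (k2 x < k2 y))) = true
    · rw [if_pos hb]
      have hxy : lt2 k1 k2 x y := (lt2_blt_iff k1 k2 x y).1 hb
      refine List.pairwise_cons.2 ⟨?_, List.pairwise_cons.2 ⟨h1, h2⟩⟩
      intro z hz
      rcases List.mem_cons.1 hz with rfl | hz
      · exact fun hc => lt2_asymm hxy hc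
      · exact fun hc => h1 z hz (lt2_trans hc hxy)
    · rw [if_neg hb]
      refine List.pairwise_cons.2 ⟨?_, ih h2⟩
      intro z hz
      rcases (PySem.List.mem_insertBy _ _ _ _).1 hz with rfl | hz
      · exact fun hc => hb ((lt2_blt_iff k1 k2 z y).2 hc)
      · exact h1 z hz

theorem sorted2_pairwise {α κ₁ κ₂ : Type} [LinearOrder κ₁] [LinearOrder κ₂] (xs : List α) (k1 : α → κ₁) (k2 : α → κ₂) :
    (PySem.List.sorted2 xs k1 k2).Pairwise (fun a b => ¬ lt2 k1 k2 b a) := by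
  have key : ∀ (acc : List α), acc.Pairwise (fun a b => ¬ lt2 k1 k2 b a) →
      (List.foldl (fun acc x => PySem.List.insertBy
        (fun a b => decide (k1 a < k1 b) || (!decide (k1 b < k1 a) && decide (k2 a < k2 b))) x acc) acc xs).Pairwise
        (fun a b => ¬ lt2 k1 k2 b a) := by
    induction xs with
    | nil => intro acc h; exact h
    | cons x xs ih =>
      intro acc h
      exact ih _ (insertBy_pairwise_lt2 k1 k2 x acc h)
  exact key [] List.Pairwise.nil

theorem sorted2_eq_of_perm_of_pairwise {α κ₁ κ₂ : Type} [LinearOrder κ₁] [LinearOrder κ₂]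
    (xs ys : List α) (k1 : α → κ₁) (k2 : α → κ₂)
    (hperm : ys.Perm xs) (hys : ys.Pairwise (lt2 k1 k2)) :
    PySem.List.sorted2 xs k1 k2 = ys := by
  have hsp : (PySem.List.sorted2 xs k1 k2).Perm ys :=
    (PySem.List.sorted2_perm xs k1 k2 false).trans hperm.symm
  have hnd : ((ys.map (fun a => (k1 a, k2 a)))).Nodup := by
    rw [List.nodup_iff_pairwise_ne, List.pairwise_map]
    exact hys.imp (fun h => by
      rcases h with h | ⟨h1, h2⟩
      · exact fun hc => absurd (congrArg Prod.fst hc) (ne_of_lt h)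
      · exact fun hc => absurd (congrArg Prod.snd hc) (ne_of_lt h2))
  have hnds : ((PySem.List.sorted2 xs k1 k2).map (fun a => (k1 a, k2 a))).Nodup :=
    (hsp.map _).nodup_iff.2 hnd
  have hne : (PySem.List.sorted2 xs k1 k2).Pairwise (fun a b => (k1 a, k2 a) ≠ (k1 b, k2 b)) := by
    rw [List.nodup_iff_pairwise_ne, List.pairwise_map] at hnds
    exact hnds
  have hs : (PySem.List.sorted2 xs k1 k2).Pairwise (lt2 k1 k2) :=
    ((sorted2_pairwise xs k1 k2).and hne).imp (fun h => lt2_of_not_of_ne h.1 h.2)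
  exact List.Perm.eq_of_pairwise (fun a b _ _ h h' => absurd h' (fun hc => lt2_asymm h hc)) hs hys hsp

-- ----- Dict plumbing on fresh keys -----

theorem mem_map_fst_not {l : List (String × String)} {k : String} (h : k ∉ l.map Prod.fst)
    {z : String × String} (hz : z ∈ l) : z.1 ≠ k := by
  intro hc
  exact h (hc ▸ List.mem_map_of_mem hz)

theorem dict_insert_fresh {k : String} (l : List (String × String)) (v : String) (h : k ∉ l.map Prod.fst) :
    (PySem.Dict.mk l).insert k v = PySem.Dict.mk (l ++ [(k, v)]) := by
  have hc : (PySem.Dict.mk l).contains k = false := by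
    rw [Bool.eq_false_iff]
    intro hc
    simp only [PySem.Dict.contains, List.any_eq_true, beq_iff_eq] at hc
    obtain ⟨p, hp, rfl⟩ := hc
    exact mem_map_fst_not h hp rfl
  simp [PySem.Dict.insert, hc]

theorem dict_update_fresh (l xs : List (String × String)) (h : ((xs ++ l).map Prod.fst).Nodup) :
    (PySem.Dict.mk xs).update l = PySem.Dict.mk (xs ++ l) := by
  induction l generalizing xs with
  | nil => simp [PySem.Dict.update]
  | cons p l ih =>
    have hk : p.1 ∉ xs.map Prod.fst := by
      simp only [List.map_append, List.nodup_append] at h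
      intro hc
      exact h.2.2 p.1 hc p.1 (by simp) rfl
    have hstep : (PySem.Dict.mk xs).update (p :: l) = ((PySem.Dict.mk xs).insert p.1 p.2).update l := by
      simp [PySem.Dict.update]
    rw [hstep, dict_insert_fresh _ _ hk, ih (xs ++ [p])
      (by simpa using h), List.append_assoc]
    simp

theorem dict_ofList_nodup (l : List (String × String)) (h : (l.map Prod.fst).Nodup) :
    PySem.Dict.ofList l = PySem.Dict.mk l := by
  have h0 : PySem.Dict.empty = PySem.Dict.mk ([] : List (String × String)) := rfl
  rw [PySem.Dict.ofList, h0, dict_update_fresh l [] (by simpa using h)]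
  simp

-- ----- the loop of A -----

-- the loop body of A's for-loop (definitionally equal to the lambda in the port)
def stepA (pivot_key : String) (st : Bool × PySem.Dict String String × PySem.Dict String String)
    (kv : String × String) : Bool × PySem.Dict String String × PySem.Dict String String :=
  if st.1 then (st.1, st.2.1, st.2.2.insert kv.1 kv.2)
  else
    let before := st.2.1.insert kv.1 kv.2
    if kv.1 == pivot_key then (true, before, st.2.2) else (st.1, before, st.2.2)

theorem stepA_true (pivot_key : String) (b a : List (String × String)) (kv : String × String) :
    stepA pivot_key (true, PySem.Dict.mk b, PySem.Dict.mk a) kv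
      = (true, PySem.Dict.mk b, (PySem.Dict.mk a).insert kv.1 kv.2) := by
  simp [stepA]

theorem stepA_false (pivot_key : String) (b a : List (String × String)) (kv : String × String) :
    stepA pivot_key (false, PySem.Dict.mk b, PySem.Dict.mk a) kv
      = if kv.1 == pivot_key then (true, (PySem.Dict.mk b).insert kv.1 kv.2, PySem.Dict.mk a)
        else (false, (PySem.Dict.mk b).insert kv.1 kv.2, PySem.Dict.mk a) := by
  simp only [stepA, Bool.false_eq_true, if_false]

theorem loopA_found (pivot_key : String) (l a b : List (String × String))
    (h : ((a ++ l).map Prod.fst).Nodup) :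
    l.foldl (stepA pivot_key) (true, PySem.Dict.mk b, PySem.Dict.mk a)
    = (true, PySem.Dict.mk b, PySem.Dict.mk (a ++ l)) := by
  induction l generalizing a with
  | nil => simp
  | cons p l ih =>
    have hk : p.1 ∉ a.map Prod.fst := by
      simp only [List.map_append, List.nodup_append] at h
      intro hc
      exact h.2.2 p.1 hc p.1 (by simp) rfl
    rw [List.foldl_cons, stepA_true, dict_insert_fresh a p.2 hk,
      ih (a ++ [p]) (by simpa using h), List.append_assoc]
    simp

theorem loopA_search (pivot_key : String) (l b : List (String × String))
    (h : ((b ++ l).map Prod.fst).Nodup) :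
    l.foldl (stepA pivot_key) (false, PySem.Dict.mk b, PySem.Dict.mk [])
    = match PySem.List.index? (l.map Prod.fst) pivot_key with
      | some i => (true, PySem.Dict.mk (b ++ l.take (i + 1)), PySem.Dict.mk (l.drop (i + 1)))
      | none => (false, PySem.Dict.mk (b ++ l), PySem.Dict.mk []) := by
  induction l generalizing b with
  | nil => simp [PySem.List.index?]
  | cons p l ih =>
    have hk : p.1 ∉ b.map Prod.fst := by
      simp only [List.map_append, List.nodup_append] at h
      intro hc
      exact h.2.2 p.1 hc p.1 (by simp) rfl
    rw [List.foldl_cons, stepA_false, dict_insert_fresh b p.2 hk]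
    by_cases hbeq : (p.1 == pivot_key) = true
    · rw [if_pos hbeq]
      rw [loopA_found pivot_key l [] (b ++ [p])
        (by simpa using ((List.nodup_append.1 (by simpa using h)).2.1).of_cons)]
      simp [PySem.List.index?, List.idxOf?_cons, hbeq]
    · rw [if_neg hbeq]
      rw [ih (b ++ [p]) (by simpa using h)]
      simp only [List.map_cons, PySem.List.index?, List.idxOf?_cons, hbeq]
      rcases hfind : List.idxOf? pivot_key (l.map Prod.fst) with _ | i
      · simp [List.append_assoc]
      · simp [List.take_succ_cons, List.drop_succ_cons, List.append_assoc]

-- decomposition of a list around a present key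
theorem split_at_key (l : List (String × String)) (k : String)
    (hnd : (l.map Prod.fst).Nodup) (hmem : k ∈ l.map Prod.fst) :
    ∃ a1 v a2, l = a1 ++ (k, v) :: a2 ∧ k ∉ a1.map Prod.fst ∧ k ∉ a2.map Prod.fst := by
  induction l with
  | nil => simp at hmem
  | cons p l ih =>
    rw [List.map_cons, List.nodup_cons] at hnd
    rw [List.map_cons, List.mem_cons] at hmem
    by_cases hp : p.1 = k
    · refine ⟨[], p.2, l, ?_, by simp, ?_⟩
      · simp [← hp]
      · rw [← hp]; exact hnd.1
    · obtain ⟨a1, v, a2, h1, h2, h3⟩ := ih hnd.2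
        (by rcases hmem with h | h
            · exact absurd h.symm hp
            · exact h)
      refine ⟨p :: a1, v, a2, by simp [h1], ?_, h3⟩
      rw [List.map_cons, List.mem_cons]
      rintro (h | h)
      · exact hp h.symm
      · exact h2 h

theorem contains_mk_iff (l : List (String × String)) (k : String) :
    (PySem.Dict.mk l).contains k = true ↔ k ∈ l.map Prod.fst := by
  simp [PySem.Dict.contains, List.any_eq_true, beq_iff_eq, List.mem_map]

theorem pop_decomp (a1 a2 : List (String × String)) (k v : String)
    (h1 : k ∉ a1.map Prod.fst) (h2 : k ∉ a2.map Prod.fst) :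
    (PySem.Dict.mk (a1 ++ (k, v) :: a2)).pop? k = some (v, PySem.Dict.mk (a1 ++ a2)) := by
  have hfind : List.find? (fun p => p.1 == k) (a1 ++ (k, v) :: a2) = some (k, v) := by
    rw [List.find?_append]
    have hnone : List.find? (fun p => p.1 == k) a1 = none :=
      List.find?_eq_none.2 (fun p hp => by
        simpa using mem_map_fst_not h1 hp)
    simp [hnone]
  have hget : (PySem.Dict.mk (a1 ++ (k, v) :: a2)).get? k = some v := by
    simp [PySem.Dict.get?, hfind]
  have herase : (PySem.Dict.mk (a1 ++ (k, v) :: a2)).erase k = PySem.Dict.mk (a1 ++ a2) := by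
    simp only [PySem.Dict.erase, List.filter_append, List.filter_cons]
    rw [List.filter_eq_self.2 (fun p hp => by simpa using mem_map_fst_not h1 hp),
        List.filter_eq_self.2 (fun p hp => by simpa using mem_map_fst_not h2 hp)]
    simp
  simp [PySem.Dict.pop?, hget, herase]

-- ----- the sorted tail -----

theorem sorted2_pairwise_fst_lt (l : List (String × String)) (hnd : (l.map Prod.fst).Nodup) :
    (PySem.List.sorted2 l Prod.fst Prod.snd).Pairwise (fun a b => a.1 < b.1) := by
  have hp := sorted2_pairwise l Prod.fst Prod.snd
  have hnds : ((PySem.List.sorted2 l Prod.fst Prod.snd).map Prod.fst).Nodup :=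
    (((PySem.List.sorted2_perm l Prod.fst Prod.snd false).map Prod.fst).nodup_iff).2 hnd
  have hne : (PySem.List.sorted2 l Prod.fst Prod.snd).Pairwise (fun a b => a.1 ≠ b.1) := by
    rw [List.nodup_iff_pairwise_ne, List.pairwise_map] at hnds
    exact hnds
  refine ((hp.and hne).imp ?_)
  rintro a b ⟨h1, h2⟩
  rcases lt_trichotomy a.1 b.1 with h | h | h
  · exact h
  · exact absurd h h2
  · exact absurd (Or.inl h) h1

-- extracting the overall minimum key in front of the key-sorted rest IS the key-sorted whole list
theorem sorted2_cons_min (a1 a2 : List (String × String)) (p : String × String)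
    (hnd : (((a1 ++ p :: a2)).map Prod.fst).Nodup)
    (hmin : ∀ y ∈ (a1 ++ p :: a2).map Prod.fst, p.1 ≤ y) :
    PySem.List.sorted2 (a1 ++ p :: a2) Prod.fst Prod.snd
      = p :: PySem.List.sorted2 (a1 ++ a2) Prod.fst Prod.snd := by
  have hnd' : ((a1 ++ a2).map Prod.fst).Nodup := by
    simp only [List.map_append, List.map_cons] at hnd ⊢
    exact hnd.sublist (List.Sublist.append (List.Sublist.refl _) (List.sublist_cons_self _ _))
  have hks : p.1 ∉ (a1 ++ a2).map Prod.fst := by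
    simp only [List.map_append, List.map_cons, List.nodup_append, List.nodup_cons] at hnd
    rw [List.map_append, List.mem_append]
    rintro (h | h)
    · exact hnd.2.2 p.1 h p.1 (by simp) rfl
    · exact hnd.2.1.1 h
  apply sorted2_eq_of_perm_of_pairwise
  · exact (List.Perm.cons _ (PySem.List.sorted2_perm (a1 ++ a2) Prod.fst Prod.snd false)).trans
      List.perm_middle.symm
  · refine List.pairwise_cons.2 ⟨?_, ?_⟩
    · intro z hz
      have hz' : z ∈ a1 ++ a2 := ((PySem.List.sorted2_perm _ _ _ false).mem_iff).1 hz
      have hle : p.1 ≤ z.1 := by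
        refine hmin z.1 ?_
        rcases List.mem_append.1 hz' with h | h
        · exact List.mem_map_of_mem (by simp [h])
        · exact List.mem_map_of_mem (by simp [h])
      have hne : z.1 ≠ p.1 := mem_map_fst_not hks hz'
      exact Or.inl (lt_of_le_of_ne hle (Ne.symm hne))
    · exact (sorted2_pairwise_fst_lt (a1 ++ a2) hnd').imp (fun h => Or.inl h)

-- ----- the loops of B -----

theorem items_mk (l : List (String × String)) : (PySem.Dict.mk l).items = l := rfl

-- B's first loop: gather up to and including the pivot, return the untouched remainder
theorem beforeLoop_spec (pivot_key : String) (l b : List (String × String))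
    (h : ((b ++ l).map Prod.fst).Nodup) :
    beforeLoop pivot_key (PySem.Dict.mk b) l
    = match PySem.List.index? (l.map Prod.fst) pivot_key with
      | some i => (PySem.Dict.mk (b ++ l.take (i + 1)), l.drop (i + 1))
      | none => (PySem.Dict.mk (b ++ l), []) := by
  induction l generalizing b with
  | nil => simp [beforeLoop, PySem.List.index?]
  | cons p l ih =>
    have hk : p.1 ∉ b.map Prod.fst := by
      simp only [List.map_append, List.nodup_append] at h
      intro hc
      exact h.2.2 p.1 hc p.1 (by simp) rfl
    simp only [beforeLoop]
    rw [dict_insert_fresh b p.2 hk]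
    by_cases hbeq : (p.1 == pivot_key) = true
    · rw [if_pos hbeq]
      simp [PySem.List.index?, List.idxOf?_cons, hbeq]
    · rw [if_neg hbeq]
      rw [ih (b ++ [p]) (by simpa using h)]
      simp only [List.map_cons, PySem.List.index?, List.idxOf?_cons, hbeq]
      rcases hfind : List.idxOf? pivot_key (l.map Prod.fst) with _ | i
      · simp [List.append_assoc]
      · simp [List.take_succ_cons, List.drop_succ_cons, List.append_assoc]

-- one unfolding step of selLoop when the chosen key sits at first index i with rest = a1 ++ p :: a2
theorem selLoop_step (priority_key : String) (o a1 a2 : List (String × String)) (p : String × String)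
    (hkey : (if ((a1 ++ p :: a2).map Prod.fst).contains priority_key then priority_key
             else ((PySem.List.min? ((a1 ++ p :: a2).map Prod.fst) (fun x => x)).getD "")) = p.1)
    (hnotpre : p.1 ∉ a1.map Prod.fst)
    (hfresh : p.1 ∉ o.map Prod.fst) :
    selLoop priority_key (PySem.Dict.mk o) (a1 ++ p :: a2)
      = selLoop priority_key (PySem.Dict.mk (o ++ [p])) (a1 ++ a2) := by
  have hne : a1 ++ p :: a2 ≠ [] := by simp
  rw [selLoop.eq_def, dif_neg hne]
  have hidx : PySem.List.index? ((a1 ++ p :: a2).map Prod.fst) p.1 = some a1.length := by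
    rw [PySem.List.index?_eq_some_iff]
    exact ⟨a1.map Prod.fst, a2.map Prod.fst, by simp, by simp, hnotpre⟩
  have hlen : a1.length < (a1 ++ p :: a2).length := by simp
  have hpop : PySem.List.pop? (a1 ++ p :: a2) ((a1.length : Nat) : Int)
      = some ((a1 ++ p :: a2)[a1.length], (a1 ++ p :: a2).eraseIdx a1.length) :=
    PySem.List.pop?_natCast _ _ hlen
  have hget : (a1 ++ p :: a2)[a1.length]'hlen = p := by
    rw [List.getElem_append_right (Nat.le_refl _)]
    simp
  have herase : (a1 ++ p :: a2).eraseIdx a1.length = a1 ++ a2 := by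
    rw [List.eraseIdx_append_of_length_le (Nat.le_refl _)]
    simp
  simp only [hkey]
  split
  next h2 =>
    rw [hkey, hidx] at h2
    simp only [Option.getD_some] at h2
    rw [hpop] at h2
    cases h2
  next pr h2 =>
    rw [hkey, hidx] at h2
    simp only [Option.getD_some] at h2
    rw [hpop] at h2
    injection h2 with h2
    subst h2
    simp only [hget, herase]
    rw [dict_insert_fresh o p.2 hfresh]

theorem extract_perm {α : Type} (o a1 a2 : List α) (p : α) :
    ((o ++ [p]) ++ (a1 ++ a2)).Perm (o ++ (a1 ++ p :: a2)) := by
  rw [List.append_assoc, List.singleton_append]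
  exact List.Perm.append_left o List.perm_middle.symm

-- selection loop with the priority key absent from the remainder = key-sorted remainder
theorem selLoop_absent (priority_key : String) (n : Nat) :
    ∀ (rest o : List (String × String)), rest.length = n →
    ((o ++ rest).map Prod.fst).Nodup → priority_key ∉ rest.map Prod.fst →
    selLoop priority_key (PySem.Dict.mk o) rest
      = PySem.Dict.mk (o ++ PySem.List.sorted2 rest Prod.fst Prod.snd) := by
  induction n using Nat.strong_induction_on with
  | _ n ih =>
    intro rest o hlen hnd habs
    rcases rest with _ | ⟨q, t⟩
    · rw [selLoop.eq_def, dif_pos rfl]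
      simp [PySem.List.sorted2]
    · have hndrest : ((q :: t).map Prod.fst).Nodup := by
        rw [List.map_append, List.nodup_append] at hnd
        exact hnd.2.1
      -- the chosen key is the minimum key
      have hcont : ((q :: t).map Prod.fst).contains priority_key = false := by
        rw [List.contains_eq_mem, decide_eq_false_iff_not]
        exact habs
      rcases hmin : PySem.List.min? ((q :: t).map Prod.fst) (fun x => x) with _ | m
      · exact absurd ((PySem.List.min?_eq_none_iff _ _).1 hmin) (by simp)
      have hmem : m ∈ (q :: t).map Prod.fst := PySem.List.min?_mem hmin
      have hmins : ∀ y ∈ (q :: t).map Prod.fst, m ≤ y := PySem.List.min?_isMin hmin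
      obtain ⟨a1, v, a2, hsplit, h1, h2⟩ := split_at_key (q :: t) m hndrest hmem
      have hfresh : m ∉ o.map Prod.fst := by
        rw [List.map_append, List.nodup_append] at hnd
        intro hc
        exact hnd.2.2 m hc m hmem rfl
      rw [hsplit]
      rw [selLoop_step priority_key o a1 a2 (m, v)
        (by rw [← hsplit, hcont]; simp only [Bool.false_eq_true, if_false]; rw [hmin]; rfl) h1 hfresh]
      have hnd' : (((o ++ [(m, v)]) ++ (a1 ++ a2)).map Prod.fst).Nodup := by
        have h0 := hnd
        rw [hsplit] at h0
        exact (((extract_perm o a1 a2 (m, v)).map Prod.fst).nodup_iff).2 h0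
      have hlen' : (a1 ++ a2).length < n := by
        have : (q :: t).length = n := hlen
        rw [hsplit] at this
        simp at this ⊢
        omega
      have habs' : priority_key ∉ (a1 ++ a2).map Prod.fst := by
        intro hc
        apply habs
        rw [hsplit]
        simp only [List.map_append, List.map_cons] at hc ⊢
        rcases List.mem_append.1 hc with h | h
        · exact List.mem_append.2 (Or.inl h)
        · exact List.mem_append.2 (Or.inr (List.mem_cons_of_mem _ h))
      rw [ih (a1 ++ a2).length hlen' (a1 ++ a2) (o ++ [(m, v)]) rfl hnd' habs']
      rw [hsplit] at hndrest hmins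
      rw [sorted2_cons_min a1 a2 (m, v) hndrest hmins]
      simp

-- selection loop with the priority key present: it is extracted first, then the sorted rest
theorem selLoop_present (priority_key : String) (o a1 a2 : List (String × String)) (v : String)
    (hnd : ((o ++ (a1 ++ (priority_key, v) :: a2)).map Prod.fst).Nodup)
    (h1 : priority_key ∉ a1.map Prod.fst) (h2 : priority_key ∉ a2.map Prod.fst) :
    selLoop priority_key (PySem.Dict.mk o) (a1 ++ (priority_key, v) :: a2)
      = PySem.Dict.mk (o ++ (priority_key, v) :: PySem.List.sorted2 (a1 ++ a2) Prod.fst Prod.snd) := by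
  have hcont : ((a1 ++ (priority_key, v) :: a2).map Prod.fst).contains priority_key = true := by
    rw [List.contains_eq_mem, decide_eq_true_eq]
    simp
  have hfresh : priority_key ∉ o.map Prod.fst := by
    rw [List.map_append, List.nodup_append] at hnd
    intro hc
    exact hnd.2.2 priority_key hc priority_key (by simp) rfl
  rw [selLoop_step priority_key o a1 a2 (priority_key, v) (by rw [hcont]; simp) h1 hfresh]
  have hnd' : (((o ++ [(priority_key, v)]) ++ (a1 ++ a2)).map Prod.fst).Nodup :=
    (((extract_perm o a1 a2 (priority_key, v)).map Prod.fst).nodup_iff).2 hnd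
  have habs' : priority_key ∉ (a1 ++ a2).map Prod.fst := by
    rw [List.map_append, List.mem_append]
    rintro (h | h)
    · exact h1 h
    · exact h2 h
  rw [selLoop_absent priority_key (a1 ++ a2).length (a1 ++ a2) (o ++ [(priority_key, v)]) rfl hnd' habs']
  simp

theorem nodup_take_drop (d : List (String × String)) (hnd : (d.map Prod.fst).Nodup) (c : Nat) :
    (((d.take c) ++ (d.drop c)).map Prod.fst).Nodup := by
  rw [List.take_append_drop]
  exact hnd

-- the main equivalence
theorem main_eq (d : List (String × String)) (pivot_key priority_key : String)
    (hnd : (d.map Prod.fst).Nodup) :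
    sort_after_key d pivot_key priority_key = sort_after_key_alt d pivot_key priority_key := by
  simp only [sort_after_key, sort_after_key_alt]
  rw [show (fun (st : Bool × PySem.Dict String String × PySem.Dict String String) (kv : String × String) =>
      if st.1 then (st.1, st.2.1, st.2.2.insert kv.1 kv.2)
      else
        let before := st.2.1.insert kv.1 kv.2
        if kv.1 == pivot_key then (true, before, st.2.2) else (st.1, before, st.2.2))
      = stepA pivot_key from rfl]
  rw [show (PySem.Dict.empty : PySem.Dict String String) = PySem.Dict.mk [] from rfl]
  rw [loopA_search pivot_key d [] (by simpa using hnd)]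
  rw [beforeLoop_spec pivot_key d [] (by simpa using hnd)]
  rcases hidx : PySem.List.index? (d.map Prod.fst) pivot_key with _ | i
  · -- pivot absent: before = all of d, after = []
    simp only [List.nil_append]
    rw [show (PySem.Dict.mk ([] : List (String × String))).contains priority_key = false from rfl]
    simp only [Bool.false_eq_true, if_false, items_mk]
    rw [show PySem.List.sorted2 ([] : List (String × String)) Prod.fst Prod.snd
        = ([] : List (String × String)) from rfl]
    rw [dict_update_fresh d [] (by simpa using hnd)]
    rw [show PySem.Dict.ofList ([] : List (String × String)) = PySem.Dict.mk [] from rfl]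
    simp only [List.nil_append]
    rw [show ∀ (t : PySem.Dict String String), t.update ([] : List (String × String)) = t from fun t => rfl]
    rw [show ∀ (t : PySem.Dict String String), t.update ([] : List (String × String)) = t from fun t => rfl]
    -- B side: the selection loop on the empty remainder returns out unchanged
    rw [show ∀ (o : PySem.Dict String String), selLoop priority_key o [] = o from
      fun o => by rw [selLoop.eq_def, dif_pos rfl]]
  · -- pivot present at index i: before = take (i+1), after = drop (i+1)
    simp only [List.nil_append]
    set bef := d.take (i + 1) with hbef
    set aft := d.drop (i + 1) with haft
    have hnd2 : ((bef ++ aft).map Prod.fst).Nodup := nodup_take_drop d hnd (i + 1)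
    have hndbef : (bef.map Prod.fst).Nodup := by
      rw [List.map_append, List.nodup_append] at hnd2
      exact hnd2.1
    have hndaft : (aft.map Prod.fst).Nodup := by
      rw [List.map_append, List.nodup_append] at hnd2
      exact hnd2.2.1
    by_cases hpr : priority_key ∈ aft.map Prod.fst
    · -- priority key present in the tail
      obtain ⟨a1, v, a2, hsplit, h1, h2⟩ := split_at_key aft priority_key hndaft hpr
      rw [(contains_mk_iff aft priority_key).2 hpr, if_pos rfl]
      rw [show PySem.Dict.mk aft = PySem.Dict.mk (a1 ++ (priority_key, v) :: a2) from by rw [← hsplit]]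
      rw [pop_decomp a1 a2 priority_key v h1 h2]
      simp only [items_mk]
      have hnda12 : ((a1 ++ a2).map Prod.fst).Nodup := by
        rw [hsplit] at hndaft
        simp only [List.map_append, List.map_cons] at hndaft ⊢
        exact hndaft.sublist (List.Sublist.append (List.Sublist.refl _) (List.sublist_cons_self _ _))
      set S := PySem.List.sorted2 (a1 ++ a2) Prod.fst Prod.snd with hS
      have hndS : (S.map Prod.fst).Nodup :=
        (((PySem.List.sorted2_perm (a1 ++ a2) Prod.fst Prod.snd false).map Prod.fst).nodup_iff).2 hnda12
      have hSperm : (S.map Prod.fst).Perm ((a1 ++ a2).map Prod.fst) :=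
        (PySem.List.sorted2_perm (a1 ++ a2) Prod.fst Prod.snd false).map Prod.fst
      have hkeyperm : ((bef ++ (priority_key, v) :: S).map Prod.fst).Perm ((bef ++ aft).map Prod.fst) := by
        simp only [List.map_append, List.map_cons]
        refine List.Perm.append_left _ ?_
        refine (List.Perm.cons _ hSperm).trans ?_
        rw [hsplit]
        simp only [List.map_append, List.map_cons]
        exact List.perm_middle.symm
      have hndall : ((bef ++ (priority_key, v) :: S).map Prod.fst).Nodup := hkeyperm.nodup_iff.2 hnd2
      rw [show (PySem.Dict.mk ([] : List (String × String))).insert priority_key v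
          = PySem.Dict.mk [(priority_key, v)] from by rw [dict_insert_fresh [] v (by simp)]; simp]
      rw [dict_update_fresh bef [] (by simpa using hndbef)]
      simp only [List.nil_append]
      have hndb1 : ((bef ++ [(priority_key, v)]).map Prod.fst).Nodup := by
        refine hndall.sublist ?_
        simp only [List.map_append, List.map_cons]
        exact List.Sublist.append (List.Sublist.refl _) (by simp)
      rw [dict_update_fresh [(priority_key, v)] bef hndb1]
      rw [dict_ofList_nodup S hndS]
      simp only [items_mk]
      have hndb2 : (((bef ++ [(priority_key, v)]) ++ S).map Prod.fst).Nodup := by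
        rw [show (bef ++ [(priority_key, v)]) ++ S = bef ++ (priority_key, v) :: S from by simp]
        exact hndall
      rw [dict_update_fresh S (bef ++ [(priority_key, v)]) hndb2]
      -- B's side: the selection loop extracts the priority key first, then the minimum repeatedly
      rw [show aft = a1 ++ (priority_key, v) :: a2 from hsplit]
      rw [selLoop_present priority_key bef a1 a2 v (by rw [← hsplit]; exact hnd2) h1 h2, ← hS]
      simp
    · -- priority key absent from the tail
      rw [show (PySem.Dict.mk aft).contains priority_key = false from by
        rw [Bool.eq_false_iff]
        intro hc
        exact hpr ((contains_mk_iff aft priority_key).1 hc)]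
      simp only [Bool.false_eq_true, if_false, items_mk]
      set S := PySem.List.sorted2 aft Prod.fst Prod.snd with hS
      have hndS : (S.map Prod.fst).Nodup :=
        (((PySem.List.sorted2_perm aft Prod.fst Prod.snd false).map Prod.fst).nodup_iff).2 hndaft
      have hSperm : (S.map Prod.fst).Perm (aft.map Prod.fst) :=
        (PySem.List.sorted2_perm aft Prod.fst Prod.snd false).map Prod.fst
      have hndall : ((bef ++ S).map Prod.fst).Nodup := by
        refine (List.Perm.nodup_iff ?_).2 hnd2
        simp only [List.map_append]
        exact List.Perm.append_left _ hSperm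
      rw [dict_update_fresh bef [] (by simpa using hndbef)]
      simp only [List.nil_append]
      rw [show ∀ (t : PySem.Dict String String), t.update ([] : List (String × String)) = t from fun t => rfl]
      rw [dict_ofList_nodup S hndS]
      simp only [items_mk]
      rw [dict_update_fresh S bef hndall]
      -- B's side
      rw [selLoop_absent priority_key aft.length aft bef rfl hnd2 hpr, ← hS]

-- ===== VERDICT (by name: the statement is the Claim_ definition above) =====
theorem sort_after_key_spec : Claim_equal_sort_after_key := by
  intro d pivot_key priority_key _ hnd
  unfold Spec_sort_after_key
  exact main_eq d pivot_key priority_key hnd
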